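-- pv_equiv track=rewrite | github.com/coling154/Lab4 | ch03_transposition_cipher.py | scramble2Encrypt2
-- ===== SOURCE A (Python) =====
-- def scramble2Encrypt2(plainText):
--     evenChars = ""
--     oddChars = ""
--     count = 0
--     for ch in plainText:
--         if count % 2 == 0:
--             evenChars = evenChars + ch
--         else:
--             oddChars = oddChars + ch
--         count = count + 1 # increamented to next position. position starts at 0
--     cipherText = evenChars + oddChars
--     return cipherText
-- ===== SOURCE B (Python) =====
-- def scramble2Encrypt2(plainText):
--     return plainText[::2] + plainText[1::2]
-- ===== Notes on version B (the rewrite author's own statement) =====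
-- stated objective: simpler
-- what changed: Replaces the counter/parity loop with per-character string concatenation by two stride-2 slices concatenated (plainText[::2] + plainText[1::2]).
import Mathlib
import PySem

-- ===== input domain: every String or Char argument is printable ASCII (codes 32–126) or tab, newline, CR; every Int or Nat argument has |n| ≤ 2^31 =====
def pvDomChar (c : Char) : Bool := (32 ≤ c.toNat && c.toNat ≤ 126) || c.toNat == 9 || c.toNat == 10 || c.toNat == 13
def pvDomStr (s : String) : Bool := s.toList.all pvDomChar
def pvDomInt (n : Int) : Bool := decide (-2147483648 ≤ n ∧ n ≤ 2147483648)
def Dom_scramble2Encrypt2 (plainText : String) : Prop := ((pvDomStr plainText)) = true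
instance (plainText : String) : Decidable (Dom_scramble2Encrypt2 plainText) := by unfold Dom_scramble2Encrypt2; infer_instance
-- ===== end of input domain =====

-- B replaces A's counter/parity loop by two stride-2 slices concatenated (simpler decomposition).
-- ===== PORT A =====
-- loop body of A: state = (evenChars, oddChars, count)
def pvStepA (st : List Char × List Char × Int) (ch : Char) : List Char × List Char × Int :=
  if PySem.Int.mod st.2.2 2 = 0 then (st.1 ++ [ch], st.2.1, st.2.2 + 1)
  else (st.1, st.2.1 ++ [ch], st.2.2 + 1)

def scramble2Encrypt2 (plainText : String) : String :=
  let r := plainText.toList.foldl pvStepA ([], [], (0 : Int))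
  String.ofList (r.1 ++ r.2.1)

-- ===== PORT B =====
-- plainText[::2] + plainText[1::2]; slice? never returns none for step 2, getD "" discharges the option
def scramble2Encrypt2_alt (plainText : String) : String :=
  ((PySem.Str.slice? plainText none none 2).getD "") ++
    ((PySem.Str.slice? plainText (some 1) none 2).getD "")

-- ===== PRECONDITION & SPEC =====
def Spec_scramble2Encrypt2 (plainText : String) (out : String) : Prop := out = scramble2Encrypt2_alt plainText
instance (plainText : String) (out : String) : Decidable (Spec_scramble2Encrypt2 plainText out) := by unfold Spec_scramble2Encrypt2; infer_instance

-- ===== CLAIM (what is proved, stated in full; the proofs are below) =====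
def Claim_equal_scramble2Encrypt2 : Prop := ∀ (plainText : String), Dom_scramble2Encrypt2 plainText → Spec_scramble2Encrypt2 plainText (scramble2Encrypt2 plainText)

-- ===== LEMMAS AND PROOFS =====

def everyOther : List Char → List Char
  | [] => []
  | [a] => [a]
  | a :: _ :: rest => a :: everyOther rest

theorem everyOther_cons (a : Char) (l : List Char) :
    everyOther (a :: l) = a :: everyOther l.tail := by
  cases l <;> simp [everyOther]

theorem filterMap_range_everyOther (xs : List Char) :
    (List.range ((xs.length + 1) / 2)).filterMap (fun k => xs[2 * k]?) = everyOther xs := by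
  induction xs using everyOther.induct with
  | case1 => simp [everyOther]
  | case2 a => simp [everyOther]
  | case3 a b rest ih =>
    have hlen : ((a :: b :: rest).length + 1) / 2 = (rest.length + 1) / 2 + 1 := by
      simp; omega
    rw [hlen, List.range_succ_eq_map]
    simp only [List.filterMap_cons, Nat.mul_zero, List.getElem?_cons_zero]
    rw [List.filterMap_map]
    have : ((fun k => (a :: b :: rest)[2 * k]?) ∘ (fun i => i + 1)) =
        (fun k => rest[2 * k]?) := by
      funext k
      have h2 : 2 * (k + 1) = 2 * k + 1 + 1 := by omega
      simp [Function.comp, h2]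
    rw [this, ih, everyOther]

theorem slice2_evens (xs : List Char) :
    PySem.List.slice? xs none none 2 = some (everyOther xs) := by
  rw [PySem.List.slice?, PySem.List.sliceIndices]
  simp only [show ¬((2:Int) < 0) from by norm_num, reduceIte]
  norm_num
  have hcount : (if 0 < xs.length then (((xs.length : Int) + 2 - 1) / 2).toNat else 0)
      = (xs.length + 1) / 2 := by
    split_ifs with h
    · omega
    · omega
  rw [hcount]
  calc (List.range ((xs.length + 1) / 2)).filterMap (fun k : Nat => xs[(2 * (k:Int)).toNat]?)
      = (List.range ((xs.length + 1) / 2)).filterMap (fun k : Nat => xs[2 * k]?) := by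
        apply List.filterMap_congr; intro k _; congr 1
    _ = everyOther xs := filterMap_range_everyOther xs

theorem slice2_odds (xs : List Char) :
    PySem.List.slice? xs (some 1) none 2 = some (everyOther xs.tail) := by
  cases xs with
  | nil => decide
  | cons a rest =>
    rw [PySem.List.slice?, PySem.List.sliceIndices]
    simp only [show ¬((2:Int) < 0) from by norm_num, reduceIte]
    norm_num
    have hcount : (if 0 < rest.length then (((rest.length : Int) + 2 - 1) / 2).toNat else 0)
        = (rest.length + 1) / 2 := by
      split_ifs with h
      · omega
      · omega
    rw [hcount]
    calc (List.range ((rest.length + 1) / 2)).filterMap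
          (fun k : Nat => (a :: rest)[(1 + 2 * (k:Int)).toNat]?)
        = (List.range ((rest.length + 1) / 2)).filterMap (fun k : Nat => rest[2 * k]?) := by
          apply List.filterMap_congr; intro k _
          have : ((1:Int) + 2 * (k:Int)).toNat = 2 * k + 1 := by omega
          simp [this]
      _ = everyOther rest := filterMap_range_everyOther rest
      _ = everyOther (a :: rest).tail := by simp

theorem foldl_stepA (xs : List Char) : ∀ (e o : List Char) (c : Int), PySem.Int.mod c 2 = 0 →
    xs.foldl pvStepA (e, o, c) =
      (e ++ everyOther xs, o ++ everyOther xs.tail, c + xs.length) := by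
  induction xs using everyOther.induct with
  | case1 => intro e o c _; simp [everyOther]
  | case2 a =>
    intro e o c hc
    have hdvd : (2:Int) ∣ c := (PySem.Int.mod_eq_zero_iff_dvd c 2).mp hc
    simp [pvStepA, hdvd, everyOther]
  | case3 a b rest ih =>
    intro e o c hc
    have hdvd : (2:Int) ∣ c := (PySem.Int.mod_eq_zero_iff_dvd c 2).mp hc
    have hnd1 : ¬ (2:Int) ∣ (c + 1) := by omega
    have hc2 : PySem.Int.mod (c + 2) 2 = 0 := by
      rw [PySem.Int.mod_eq_emod_of_pos (by norm_num)]
      omega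
    have h1 : pvStepA (e, o, c) a = (e ++ [a], o, c + 1) := by simp [pvStepA, hdvd]
    have h2 : pvStepA (e ++ [a], o, c + 1) b = (e ++ [a], o ++ [b], c + 2) := by
      simp [pvStepA, hnd1]
      omega
    simp only [List.foldl_cons, h1, h2, ih (e ++ [a]) (o ++ [b]) (c + 2) hc2]
    rw [show everyOther (a :: b :: rest) = a :: everyOther rest from rfl,
      show (a :: b :: rest).tail = b :: rest from rfl, everyOther_cons]
    simp
    omega

-- ===== VERDICT (by name: the statement is the Claim_ definition above) =====
theorem scramble2Encrypt2_spec : Claim_equal_scramble2Encrypt2 := by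
  unfold Claim_equal_scramble2Encrypt2
  intro plainText _
  unfold Spec_scramble2Encrypt2 scramble2Encrypt2 scramble2Encrypt2_alt
  rw [foldl_stepA plainText.toList [] [] 0 (by decide)]
  simp only [PySem.Str.slice?, PySem.Chars.slice?, slice2_evens, slice2_odds,
    Option.map_some, Option.getD_some]
  exact String.ofList_append
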